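-- pv_equiv track=rewrite | github.com/manwar/perlweeklychallenge-club | challenge-172/roger-bell-west/python/ch-1.py | primepartition
-- ===== SOURCE A (Python) =====
-- from math import sqrt,floor,log
-- from collections import deque
--
-- def genprimes(mx):
--   primesh=set(range(2,4))
--   for i in range(6,mx+2,6):
--     for j in range(i-1,i+2,2):
--       if j <= mx:
--         primesh.add(j)
--   q=deque([2,3,5,7])
--   p=q.popleft()
--   mr=floor(sqrt(mx))
--   while p <= mr:
--     if p in primesh:
--       for i in range(p*p,mx+1,p):
--         primesh.discard(i)
--     if len(q) < 2:
--       q.append(q[-1]+4)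
--       q.append(q[-1]+2)
--     p=q.popleft()
--   primes=list(primesh)
--   primes.sort()
--   return primes
--
-- def primepartition(n, divs):
--   pl = genprimes(n)
--   p = [[]]
--   while len(p) > 0:
--     pa = p.pop()
--     if len(pa) == divs:
--       if sum(pa) == n:
--         return pa
--     else:
--       px = set(pa)
--       for pq in pl:
--         if pq not in px:
--           pb = pa.copy()
--           pb.append(pq)
--           p.append(pb)
--   return [n]
-- ===== SOURCE B (Python) =====
-- from math import isqrt
--
--
-- def genprimes(mx):
--   # wheel-6 sieve: candidates are 2, 3 and 6k+-1; cross off multiples of each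
--   # surviving candidate up to isqrt(mx)
--   sieve = {2, 3} | {c for i in range(6, mx + 2, 6) for c in (i - 1, i + 1) if c <= mx}
--   mr = isqrt(mx)
--   ps = [2, 3] + [c for i in range(6, mr + 2, 6) for c in (i - 1, i + 1) if c <= mr]
--   for p in ps:
--     if p in sieve:
--       sieve.difference_update(range(p * p, mx + 1, p))
--   return sorted(sieve)
--
--
-- def primepartition(n, divs):
--   pl = genprimes(n)
--
--   def rec(cur):
--     if len(cur) == divs:
--       return cur if sum(cur) == n else None
--     for pq in reversed(pl):
--       if pq not in cur:
--         r = rec(cur + [pq])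
--         if r is not None:
--           return r
--     return None
--
--   res = rec([])
--   return res if res is not None else [n]
-- ===== Notes on version B (the rewrite author's own statement) =====
-- stated objective: simpler
-- what changed: The deque-driven candidate stream of the sieve is replaced by a comprehension-built candidate set and an explicit 6k+-1 candidate list folded over, and the explicit-stack DFS loop of primepartition is replaced by a short recursive backtracking helper that scans reversed(pl) and returns the first success (same largest-prime-first traversal, same results).
import Mathlib
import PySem

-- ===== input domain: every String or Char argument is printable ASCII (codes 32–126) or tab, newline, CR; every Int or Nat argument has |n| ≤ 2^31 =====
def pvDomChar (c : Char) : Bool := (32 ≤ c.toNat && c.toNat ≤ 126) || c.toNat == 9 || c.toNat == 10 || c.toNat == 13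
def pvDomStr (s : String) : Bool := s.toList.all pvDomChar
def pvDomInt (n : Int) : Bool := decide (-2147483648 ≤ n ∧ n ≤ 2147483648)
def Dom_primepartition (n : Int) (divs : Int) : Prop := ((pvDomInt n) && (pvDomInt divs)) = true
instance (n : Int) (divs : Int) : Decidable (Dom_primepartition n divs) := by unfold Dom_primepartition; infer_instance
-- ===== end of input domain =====

-- B replaces A's deque-driven candidate stream in the sieve by a comprehension-built candidate set
-- and an explicit 6k±1 candidate list, and replaces A's explicit-stack DFS loop by a recursive
-- backtracking helper (same largest-prime-first traversal, same results); objective: simpler.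

-- ===== PORT A =====

-- number of elements of pl not occurring in pa; termination measure for both ports' search
def freeCount (pl pa : List Int) : Nat := (pl.filter (fun x => !(pa.contains x))).length

def aMeasure (pl : List Int) (stack : List (List Int)) : Nat :=
  (stack.map (fun pa => (pl.length + 1) ^ freeCount pl pa)).sum

lemma freeCount_append_lt (pl pa : List Int) (pq : Int) (h1 : pq ∈ pl) (h2 : pq ∉ pa) :
    freeCount pl (pa ++ [pq]) < freeCount pl pa := by
  unfold freeCount
  have hsub : pl.filter (fun x => !((pa ++ [pq]).contains x))
      = (pl.filter (fun x => !(pa.contains x))).filter (fun x => !decide (x = pq)) := by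
    rw [List.filter_filter]
    apply List.filter_congr
    intro x _
    simp [List.mem_append, Bool.not_or]
    exact Bool.and_comm _ _
  rw [hsub]
  have hmem : pq ∈ pl.filter (fun x => !(pa.contains x)) := by
    simp [List.mem_filter, h1, h2]
  exact List.length_filter_lt_length_iff_exists.mpr ⟨pq, hmem, by simp⟩

lemma aMeasure_exts_lt (pl pa : List Int) :
    aMeasure pl ((pl.filter (fun x => !(pa.contains x))).reverse.map (fun pq => pa ++ [pq]))
      < (pl.length + 1) ^ freeCount pl pa := by
  set B := pl.length with hB
  set l := pl.filter (fun x => !(pa.contains x)) with hl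
  have hf : freeCount pl pa = l.length := rfl
  rcases Nat.eq_zero_or_pos l.length with h0 | hpos
  · have : l = [] := List.length_eq_zero_iff.mp h0
    simp [aMeasure, this, hf]
  · have hbound : ∀ y ∈ (l.reverse.map (fun pq => pa ++ [pq])).map
        (fun pb => (B + 1) ^ freeCount pl pb), y ≤ (B + 1) ^ (l.length - 1) := by
      intro y hy
      simp only [List.mem_map, List.mem_reverse] at hy
      obtain ⟨pb, ⟨pq, hpq, rfl⟩, rfl⟩ := hy
      have hpq' : pq ∈ pl ∧ pq ∉ pa := by
        have := List.mem_filter.mp (hl ▸ hpq)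
        simpa using this
      have hlt : freeCount pl (pa ++ [pq]) < l.length :=
        hf ▸ freeCount_append_lt pl pa pq hpq'.1 hpq'.2
      exact Nat.pow_le_pow_right (Nat.succ_le_succ (Nat.zero_le B)) (by omega)
    have hsum := List.sum_le_card_nsmul _ _ hbound
    simp only [List.length_map, List.length_reverse, smul_eq_mul] at hsum
    have hlen_le : l.length ≤ B := hl ▸ (List.length_filter_le _ pl)
    calc aMeasure pl (l.reverse.map (fun pq => pa ++ [pq]))
        = ((l.reverse.map (fun pq => pa ++ [pq])).map
            (fun pb => (B + 1) ^ freeCount pl pb)).sum := rfl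
      _ ≤ l.length * (B + 1) ^ (l.length - 1) := hsum
      _ ≤ B * (B + 1) ^ (l.length - 1) := Nat.mul_le_mul_right _ hlen_le
      _ < (B + 1) * (B + 1) ^ (l.length - 1) := by
          have hx : 0 < (B + 1) ^ (l.length - 1) := Nat.pow_pos (Nat.succ_pos B)
          nlinarith
      _ = (B + 1) ^ (l.length - 1 + 1) := by ring
      _ = (B + 1) ^ freeCount pl pa := by rw [hf]; congr 1; omega

-- bridges the attached candidate list the termination elaborator introduces back to the plain one
lemma attach_exts_eq (pl pa : List Int) :
    List.map (fun x => pa ++ [x.1]) (List.filter (fun x => !pa.contains x.1) pl.attach).reverse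
      = List.map (fun pq => pa ++ [pq]) ((List.filter (fun x => !pa.contains x) pl).reverse) := by
  simp only [List.map_reverse, List.map_subtype, List.unattach_filter, List.unattach_attach]

-- the deque-driven sieve loop of A's genprimes: state (p, q, primesh); ported with a fuel bound
-- (mx.toNat.sqrt + 2): p starts at 2 and strictly increases each iteration, so the Python loop
-- condition p ≤ mr = floor(sqrt(mx)) fails within that many iterations — the fuel is only a
-- totality guard, never reached on any input.
def sieveLoop (mx mr : Int) : Nat → Int → List Int → PySem.Set Int → PySem.Set Int
  | 0, _, _, s => s
  | fuel + 1, p, q, s =>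
    if p ≤ mr then
      let s' := if PySem.Set.contains s p then
          (PySem.List.pyRange (p * p) (mx + 1) p).foldl (fun t i => PySem.Set.discard t i) s
        else s
      let q' := if q.length < 2 then
          let q1 := q ++ [q.getLast! + 4]
          q1 ++ [q1.getLast! + 2]
        else q
      match q' with
      | p' :: qrest => sieveLoop mx mr fuel p' qrest s'
      | [] => s'    -- unreachable: q is never empty
    else s

-- A's genprimes: wheel candidates added by nested range loops, then the deque-driven crossing loop.
-- mr = floor(sqrt(mx)): Nat.sqrt is exact for math.sqrt-floor on 0 ≤ mx ≤ 2^31 (double sqrt is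
-- correctly rounded and integers' roots are farther than an ulp from crossing an integer there)
def genprimes (mx : Int) : List Int :=
  let s0 : PySem.Set Int := PySem.Set.ofList [2, 3]   -- set(range(2,4))
  let s1 := (PySem.List.pyRange 6 (mx + 2) 6).foldl (fun s i =>
      (PySem.List.pyRange (i - 1) (i + 2) 2).foldl
        (fun s j => if j ≤ mx then PySem.Set.add s j else s) s) s0
  let mr : Int := (mx.toNat.sqrt : Int)
  let s2 := sieveLoop mx mr (mx.toNat.sqrt + 2) 2 [3, 5, 7] s1
  PySem.List.sorted s2 (fun x => x) false   -- primes = list(primesh); primes.sort()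

-- the while-loop of primepartition: stack head = Python stack top (p.pop()); the pushes
-- 'for pq in pl: p.append(pb)' appear head-first in reverse order of pl.
def aloop (pl : List Int) (n divs : Int) (stack : List (List Int)) : List Int :=
  match stack with
  | [] => [n]
  | pa :: rest =>
    if (pa.length : Int) = divs then
      if pa.sum = n then pa else aloop pl n divs rest
    else
      aloop pl n divs
        (((pl.filter (fun x => !(pa.contains x))).reverse.map (fun pq => pa ++ [pq])) ++ rest)
termination_by aMeasure pl stack
decreasing_by
  · simp only [aMeasure, List.map_cons, List.sum_cons]
    have : 0 < (pl.length + 1) ^ freeCount pl pa := Nat.pow_pos (Nat.succ_pos pl.length)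
    omega
  · simp only [aMeasure, List.map_append, List.sum_append, List.map_cons, List.sum_cons]
    rw [attach_exts_eq]
    have := aMeasure_exts_lt pl pa
    simp only [aMeasure] at this
    omega

def primepartition (n : Int) (divs : Int) : List Int :=
  let pl := genprimes n
  aloop pl n divs [[]]    -- p = [[]]

-- ===== PORT B =====

-- B's genprimes: the candidate set is built by a comprehension ({2,3} | {6k±1 ≤ mx}), the crossing
-- loop folds over an explicitly built candidate list ps = [2,3] + [6k±1 ≤ mr], and each crossing
-- pass is a single difference_update.  mr = isqrt(mx) = Nat.sqrt (exact integer square root).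
def genprimesAlt (mx : Int) : List Int :=
  let sieve0 : PySem.Set Int :=
    PySem.Set.union (PySem.Set.ofList [2, 3])
      (PySem.Set.ofList (((PySem.List.pyRange 6 (mx + 2) 6).flatMap
        (fun i => [i - 1, i + 1])).filter (fun c => decide (c ≤ mx))))
  let mr : Int := (mx.toNat.sqrt : Int)
  let ps : List Int := [2, 3] ++ (((PySem.List.pyRange 6 (mr + 2) 6).flatMap
      (fun i => [i - 1, i + 1])).filter (fun c => decide (c ≤ mr)))
  let sieve := ps.foldl (fun s p =>
      if PySem.Set.contains s p then PySem.Set.diff s (PySem.List.pyRange (p * p) (mx + 1) p)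
      else s) sieve0
  PySem.List.sorted sieve (fun x => x) false   -- return sorted(sieve)

-- recursive backtracking helper 'rec' of B; iterates reversed(pl), first success wins
def brec (pl : List Int) (n divs : Int) (cur : List Int) : Option (List Int) :=
  if (cur.length : Int) = divs then
    if cur.sum = n then some cur else none
  else
    pl.reverse.attach.findSome? (fun pq =>
      if pq.1 ∈ cur then none else brec pl n divs (cur ++ [pq.1]))
termination_by freeCount pl cur
decreasing_by
  exact freeCount_append_lt pl cur pq.1 (List.mem_reverse.mp pq.2) (by assumption)

def primepartition_alt (n : Int) (divs : Int) : List Int :=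
  let pl := genprimesAlt n
  match brec pl n divs [] with
  | some r => r
  | none => [n]

-- ===== PRECONDITION & SPEC =====
-- math.sqrt(n) / math.isqrt(n) raise ValueError for n < 0, so both programs only return for 0 ≤ n
def Pre_primepartition (n : Int) (divs : Int) : Prop := 0 ≤ n
instance (n : Int) (divs : Int) : Decidable (Pre_primepartition n divs) := by
  unfold Pre_primepartition; infer_instance
def pvWitness_primepartition : Int × Int := (10, 2)

def Spec_primepartition (n : Int) (divs : Int) (out : List Int) : Prop := out = primepartition_alt n divs
instance (n : Int) (divs : Int) (out : List Int) : Decidable (Spec_primepartition n divs out) := by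
  unfold Spec_primepartition; infer_instance

-- ===== CLAIM (what is proved, stated in full; the proofs are below) =====
def Claim_equal_primepartition : Prop := ∀ (n : Int) (divs : Int), Dom_primepartition n divs → Pre_primepartition n divs → Spec_primepartition n divs (primepartition n divs)

-- ===== LEMMAS AND PROOFS =====

-- ---- generic range lemmas ----

lemma pyRange_cons_of_pos (a b s : Int) (hs : 0 < s) (h : a < b) :
    PySem.List.pyRange a b s = a :: PySem.List.pyRange (a + s) b s := by
  rw [PySem.List.pyRange_of_pos _ _ hs, PySem.List.pyRange_of_pos _ _ hs]
  have hN : ((b - a + s - 1) / s).toNat = (if a + s < b then ((b - (a+s) + s - 1) / s).toNat else 0) + 1 := by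
    split_ifs with h2
    · have h1 : (b - a + s - 1) / s = (b - (a+s) + s - 1) / s + 1 := by
        have he : b - a + s - 1 = (b - (a+s) + s - 1) + 1 * s := by ring
        rw [he, Int.add_mul_ediv_right _ _ (by omega)]
      rw [h1]
      have : 0 ≤ (b - (a+s) + s - 1) / s := Int.ediv_nonneg (by omega) (by omega)
      omega
    · have he : b - a + s - 1 = (b - a - 1) + 1 * s := by ring
      have h0 : (b - a - 1) / s = 0 := Int.ediv_eq_zero_of_lt (by omega) (by omega)
      rw [he, Int.add_mul_ediv_right _ _ (by omega), h0]
      omega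
  rw [if_pos h, hN, List.range_succ_eq_map]
  simp [List.map_map, Function.comp]
  intro k hk
  ring

lemma pyRange_nil_of_le (a b s : Int) (hs : 0 < s) (h : b ≤ a) :
    PySem.List.pyRange a b s = [] := by
  rw [PySem.List.pyRange_of_pos _ _ hs, if_neg (by omega)]
  simp

lemma pyRange_pair (i : Int) :
    PySem.List.pyRange (i - 1) (i + 2) 2 = [i - 1, i + 1] := by
  rw [pyRange_cons_of_pos _ _ _ (by omega) (by omega)]
  rw [show i - 1 + 2 = i + 1 by ring]
  rw [pyRange_cons_of_pos _ _ _ (by omega) (by omega)]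
  rw [pyRange_nil_of_le _ _ _ (by omega) (by omega)]

-- ---- membership / nodup of the two candidate sets ----

lemma mem_discard_fold (l : List Int) (s : PySem.Set Int) (x : Int) :
    x ∈ l.foldl (fun t i => PySem.Set.discard t i) s ↔ x ∈ s ∧ x ∉ l := by
  induction l generalizing s with
  | nil => simp
  | cons a t ih =>
    simp only [List.foldl_cons, ih, PySem.Set.mem_discard, List.mem_cons]
    tauto

lemma nodup_discard_fold (l : List Int) (s : PySem.Set Int) (h : s.Nodup) :
    (l.foldl (fun t i => PySem.Set.discard t i) s).Nodup := by
  induction l generalizing s with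
  | nil => exact h
  | cons a t ih => exact ih _ (PySem.Set.nodup_discard _ _ h)

lemma mem_candA (mx : Int) (x : Int) : ∀ (l : List Int) (s : PySem.Set Int),
    (x ∈ l.foldl (fun s i =>
      (PySem.List.pyRange (i - 1) (i + 2) 2).foldl
        (fun s j => if j ≤ mx then PySem.Set.add s j else s) s) s)
    ↔ x ∈ s ∨ ∃ i ∈ l, (x = i - 1 ∨ x = i + 1) ∧ x ≤ mx := by
  intro l
  induction l with
  | nil => simp
  | cons a t ih =>
    intro s
    rw [List.foldl_cons, ih]
    have hfa : (x ∈ (fun s i =>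
        (PySem.List.pyRange (i - 1) (i + 2) 2).foldl
          (fun s j => if j ≤ mx then PySem.Set.add s j else s) s) s a)
        ↔ x ∈ s ∨ ((x = a - 1 ∧ a - 1 ≤ mx) ∨ (x = a + 1 ∧ a + 1 ≤ mx)) := by
      simp only [pyRange_pair, List.foldl_cons, List.foldl_nil]
      split_ifs with h1 h2 h2 <;> simp only [PySem.Set.mem_add, h1, h2] <;> tauto
    rw [hfa]
    have hPa : ∀ i : Int, (((x = i - 1 ∨ x = i + 1) ∧ x ≤ mx) ↔
        ((x = i - 1 ∧ i - 1 ≤ mx) ∨ (x = i + 1 ∧ i + 1 ≤ mx))) := by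
      intro i; omega
    simp only [List.mem_cons, exists_eq_or_imp, hPa]
    exact or_assoc

lemma nodup_candA (mx : Int) : ∀ (l : List Int) (s : PySem.Set Int), s.Nodup →
    (l.foldl (fun s i =>
      (PySem.List.pyRange (i - 1) (i + 2) 2).foldl
        (fun s j => if j ≤ mx then PySem.Set.add s j else s) s) s).Nodup := by
  intro l
  induction l with
  | nil => exact fun s h => h
  | cons a t ih =>
    intro s hs
    rw [List.foldl_cons]
    apply ih
    simp only [pyRange_pair, List.foldl_cons, List.foldl_nil]
    split_ifs <;>
      first
        | exact hs
        | exact PySem.Set.nodup_add _ _ hs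
        | exact PySem.Set.nodup_add _ _ (PySem.Set.nodup_add _ _ hs)

-- ---- the crossing folds of the two ports agree up to permutation ----

lemma step_perm (mx : Int) (ps : List Int) : ∀ (s s' : PySem.Set Int),
    s.Perm s' → s.Nodup →
    (ps.foldl (fun s p =>
        if PySem.Set.contains s p then
          (PySem.List.pyRange (p * p) (mx + 1) p).foldl (fun t i => PySem.Set.discard t i) s
        else s) s).Perm
      (ps.foldl (fun s p =>
        if PySem.Set.contains s p then PySem.Set.diff s (PySem.List.pyRange (p * p) (mx + 1) p)
        else s) s') := by
  induction ps with
  | nil => exact fun s s' hperm _ => hperm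
  | cons p t ih =>
    intro s s' hperm hnd
    have hnd' : s'.Nodup := hperm.nodup hnd
    have hc : PySem.Set.contains s p = PySem.Set.contains s' p := by
      by_cases hp : p ∈ s
      · rw [(PySem.Set.contains_iff s p).mpr hp,
          (PySem.Set.contains_iff s' p).mpr (hperm.mem_iff.mp hp)]
      · have h1 : PySem.Set.contains s p = false := by
          cases hb2 : PySem.Set.contains s p
          · rfl
          · exact absurd ((PySem.Set.contains_iff s p).mp hb2) hp
        have h2 : PySem.Set.contains s' p = false := by
          cases hb2 : PySem.Set.contains s' p
          · rfl
          · exact absurd (hperm.mem_iff.mpr ((PySem.Set.contains_iff s' p).mp hb2)) hp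
        rw [h1, h2]
    simp only [List.foldl_cons]
    by_cases hp : PySem.Set.contains s p = true
    · rw [if_pos hp, if_pos (hc ▸ hp)]
      apply ih
      · rw [List.perm_ext_iff_of_nodup (nodup_discard_fold _ _ hnd)
          (PySem.Set.nodup_diff _ _ hnd')]
        intro a
        rw [mem_discard_fold, PySem.Set.mem_diff, hperm.mem_iff]
      · exact nodup_discard_fold _ _ hnd
    · rw [if_neg hp, if_neg (hc ▸ hp)]
      exact ih s s' hperm hnd

-- ---- A's deque loop is the fold over the explicit candidate list ----

lemma sieve_window (mx mr : Int) : ∀ (fuel : Nat) (k : Int) (s : PySem.Set Int),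
    1 ≤ k → mr < 6 * k - 4 + 3 * (fuel : Int) →
    sieveLoop mx mr fuel (6 * k - 1) [6 * k + 1] s
      = (((PySem.List.pyRange (6 * k) (mr + 2) 6).flatMap
            (fun i => [i - 1, i + 1])).filter (fun c => decide (c ≤ mr))).foldl
          (fun s p =>
            if PySem.Set.contains s p then
              (PySem.List.pyRange (p * p) (mx + 1) p).foldl (fun t i => PySem.Set.discard t i) s
            else s) s := by
  intro fuel
  induction fuel using Nat.strong_induction_on with
  | _ fuel IH =>
    intro k s hk hfuel
    by_cases hp : 6 * k - 1 ≤ mr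
    · obtain ⟨f, rfl⟩ : ∃ f, fuel = f + 2 := ⟨fuel - 2, by omega⟩
      rw [pyRange_cons_of_pos (6*k) (mr+2) 6 (by omega) (by omega)]
      simp only [List.flatMap_cons, List.filter_append, List.filter_cons, List.filter_nil,
        List.foldl_append, decide_eq_true_eq]
      rw [if_pos hp]
      by_cases hp2 : 6 * k + 1 ≤ mr
      · rw [if_pos hp2]
        simp only [sieveLoop, if_pos hp, List.length_cons, List.length_nil,
          List.getLast!, List.foldl_cons, List.foldl_nil]
        simp only [List.cons_append, List.nil_append, List.getLast_singleton]
        norm_num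
        rw [if_pos (show 6 * k < mr by omega)]
        rw [show 6 * k + 1 + 4 + 2 = 6 * (k + 1) + 1 by ring,
          show 6 * k + 1 + 4 = 6 * (k + 1) - 1 by ring,
          show 6 * k + 6 = 6 * (k + 1) by ring]
        have hh := IH f (by omega) (k + 1)
          (if 6 * k + 1 ∈
              (if 6 * k - 1 ∈ s then
                List.foldl (fun t i => t.discard i) s
                  (PySem.List.pyRange ((6 * k - 1) * (6 * k - 1)) (mx + 1) (6 * k - 1))
              else s) then
            List.foldl (fun t i => t.discard i)
              (if 6 * k - 1 ∈ s then
                List.foldl (fun t i => t.discard i) s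
                  (PySem.List.pyRange ((6 * k - 1) * (6 * k - 1)) (mx + 1) (6 * k - 1))
              else s)
              (PySem.List.pyRange ((6 * k + 1) * (6 * k + 1)) (mx + 1) (6 * k + 1))
          else
            (if 6 * k - 1 ∈ s then
              List.foldl (fun t i => t.discard i) s
                (PySem.List.pyRange ((6 * k - 1) * (6 * k - 1)) (mx + 1) (6 * k - 1))
            else s))
          (by omega) (by push_cast at hfuel ⊢; omega)
        simpa using hh
      · rw [if_neg hp2]
        have hnil2 : PySem.List.pyRange (6 * k + 6) (mr + 2) 6 = [] :=
          pyRange_nil_of_le _ _ _ (by omega) (by omega)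
        rw [hnil2]
        simp only [sieveLoop, if_pos hp, List.length_cons, List.length_nil,
          List.getLast!, List.foldl_cons, List.foldl_nil]
        simp only [List.cons_append, List.nil_append, List.getLast_singleton]
        norm_num
        intro h
        exact absurd h (by omega)
    · have hnil : PySem.List.pyRange (6*k) (mr+2) 6 = [] := pyRange_nil_of_le _ _ _ (by omega) (by omega)
      rw [hnil]
      cases fuel with
      | zero => simp [sieveLoop]
      | succ f => simp [sieveLoop, hp]

lemma sieve_structural (mx : Int) (hmx : 0 ≤ mx) (s : PySem.Set Int) :
    sieveLoop mx ((mx.toNat.sqrt : Int)) (mx.toNat.sqrt + 2) 2 [3, 5, 7] s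
      = ([2, 3] ++ (((PySem.List.pyRange 6 ((mx.toNat.sqrt : Int) + 2) 6).flatMap
            (fun i => [i - 1, i + 1])).filter (fun c => decide (c ≤ (mx.toNat.sqrt : Int))))).foldl
          (fun s p =>
            if PySem.Set.contains s p then
              (PySem.List.pyRange (p * p) (mx + 1) p).foldl (fun t i => PySem.Set.discard t i) s
            else s) s := by
  set r : Nat := mx.toNat.sqrt with hr
  have hrx : (mx.toNat : Int) = mx := Int.toNat_of_nonneg hmx
  rcases Nat.lt_or_ge r 2 with h2 | h2
  · -- mr ≤ 1, i.e. mx ≤ 3: the loop exits at once and both of B's crossing ranges are empty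
    have hmx3 : mx ≤ 3 := by
      have := Nat.sqrt_lt'.mp h2
      omega
    have hnil : PySem.List.pyRange 6 ((r : Int) + 2) 6 = [] :=
      pyRange_nil_of_le _ _ _ (by omega) (by omega)
    have h4 : PySem.List.pyRange (2 * 2) (mx + 1) 2 = [] :=
      pyRange_nil_of_le _ _ _ (by omega) (by omega)
    have h9 : PySem.List.pyRange (3 * 3) (mx + 1) 3 = [] :=
      pyRange_nil_of_le _ _ _ (by omega) (by omega)
    obtain ⟨f, hf⟩ : ∃ f, r + 2 = f + 1 := ⟨r + 1, by omega⟩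
    rw [hf, hnil]
    simp only [sieveLoop, List.flatMap_nil, List.filter_nil, List.append_nil,
      List.foldl_cons, List.foldl_nil, h4, h9]
    rw [if_neg (show ¬ ((2:Int) ≤ (r:Int)) by omega)]
    split_ifs <;> rfl
  · rcases Nat.lt_or_ge r 3 with h3 | h3
    · -- mr = 2, i.e. 4 ≤ mx ≤ 8: only p = 2 is processed by A; B's pass at 3 crosses an empty range
      have hmx8 : mx ≤ 8 := by
        have := Nat.sqrt_lt'.mp h3
        omega
      have hnil : PySem.List.pyRange 6 ((r : Int) + 2) 6 = [] :=
        pyRange_nil_of_le _ _ _ (by omega) (by omega)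
      have h9 : PySem.List.pyRange (3 * 3) (mx + 1) 3 = [] :=
        pyRange_nil_of_le _ _ _ (by omega) (by omega)
      obtain ⟨f, hf⟩ : ∃ f, r + 2 = f + 2 := ⟨r, rfl⟩
      rw [hf, hnil]
      simp only [sieveLoop, List.flatMap_nil, List.filter_nil, List.append_nil,
        List.length_cons, List.length_nil, List.foldl_cons, List.foldl_nil, h9]
      norm_num
      split_ifs <;> first | rfl | (exfalso; push_cast at *; omega)
    · -- mr ≥ 3: A processes 2 and 3 and enters the window at (5, [7]), i.e. k = 1
      obtain ⟨f, hf⟩ : ∃ f, r + 2 = f + 2 := ⟨r, rfl⟩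
      rw [hf]
      simp only [sieveLoop, List.length_cons, List.length_nil]
      norm_num
      have hw := sieve_window mx ((r : Int)) f 1
      simp only [show (6:Int) * 1 = 6 by ring] at hw
      rw [if_pos (show 2 ≤ r by omega), if_pos (show 3 ≤ r by omega)]
      simpa using hw _ (le_refl 1) (by push_cast; omega)

-- ---- the two genprimes agree ----

lemma genprimes_eq (mx : Int) (hmx : 0 ≤ mx) : genprimes mx = genprimesAlt mx := by
  unfold genprimes genprimesAlt
  dsimp only
  rw [sieve_structural mx hmx]
  rw [PySem.List.sorted_id_eq_sorted_id_iff_perm]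
  apply step_perm
  · rw [List.perm_ext_iff_of_nodup
      (nodup_candA mx _ _ (PySem.Set.nodup_ofList _))
      (PySem.Set.nodup_union _ _ (PySem.Set.nodup_ofList _))]
    intro a
    rw [mem_candA, PySem.Set.mem_union]
    rw [PySem.Set.mem_ofList, PySem.Set.mem_ofList]
    simp only [List.mem_filter, List.mem_flatMap, decide_eq_true_eq, List.mem_cons,
      List.not_mem_nil, or_false]
    constructor
    · rintro (h0 | ⟨i, hi, hx, hle⟩)
      · exact Or.inl h0
      · exact Or.inr ⟨⟨i, hi, hx⟩, hle⟩
    · rintro (h0 | ⟨⟨i, hi, hx⟩, hle⟩)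
      · exact Or.inl h0
      · exact Or.inr ⟨i, hi, hx, hle⟩
  · exact nodup_candA mx _ _ (PySem.Set.nodup_ofList _)

-- ---- the DFS stack loop and the backtracking recursion agree ----

lemma findSome?_guard (pa : List Int) (f : Int → Option (List Int)) : ∀ l : List Int,
    l.findSome? (fun pq => if pq ∈ pa then none else f pq)
      = (l.filter (fun x => !(pa.contains x))).findSome? f := by
  intro l
  induction l with
  | nil => rfl
  | cons x xs ih =>
    rw [List.findSome?_cons, List.filter_cons]
    by_cases hx : x ∈ pa
    · rw [if_pos hx]
      have hc : (!pa.contains x) = false := by simp [hx]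
      rw [hc]
      simpa using ih
    · rw [if_neg hx]
      have hc : (!pa.contains x) = true := by simp [hx]
      rw [hc]
      rw [if_pos rfl, List.findSome?_cons, ih]

lemma findSome?_attach (l : List Int) (f : Int → Option (List Int)) :
    l.attach.findSome? (fun pq => f pq.1) = l.findSome? f := by
  conv_rhs => rw [← List.attach_map_subtype_val l]
  rw [List.findSome?_map]
  rfl

lemma brec_ne (pl : List Int) (n divs : Int) (pa : List Int)
    (hlen : ¬ ((pa.length : Int) = divs)) :
    brec pl n divs pa
      = ((pl.filter (fun x => !(pa.contains x))).map
          (fun pq => pa ++ [pq])).reverse.findSome? (brec pl n divs) := by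
  rw [brec, if_neg hlen]
  rw [findSome?_attach (pl.reverse) (fun pq => if pq ∈ pa then none else brec pl n divs (pa ++ [pq]))]
  rw [findSome?_guard pa (fun pq => brec pl n divs (pa ++ [pq])) pl.reverse]
  rw [List.filter_reverse, ← List.map_reverse, List.findSome?_map]
  rfl

lemma aloop_eq (pl : List Int) (n divs : Int) (stack : List (List Int)) :
    aloop pl n divs stack = (stack.findSome? (brec pl n divs)).getD [n] := by
  induction stack using aloop.induct pl n divs with
  | case1 => simp [aloop]
  | case2 pa rest hlen hsum =>
    rw [aloop, if_pos hlen, if_pos hsum]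
    rw [List.findSome?_cons, brec, if_pos hlen, if_pos hsum]
    rfl
  | case3 pa rest hlen hsum ih =>
    rw [aloop, if_pos hlen, if_neg hsum]
    rw [List.findSome?_cons, brec, if_pos hlen, if_neg hsum]
    exact ih
  | case4 pa rest hlen ih =>
    simp only [List.map_reverse, List.map_subtype, List.unattach_filter,
      List.unattach_attach] at ih
    rw [aloop, if_neg hlen]
    simp only [List.map_reverse]
    rw [ih, List.findSome?_append, List.findSome?_cons, ← brec_ne pl n divs pa hlen]
    cases brec pl n divs pa <;> rfl

-- ===== VERDICT (by name: the statement is the Claim_ definition above) =====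
theorem primepartition_spec : Claim_equal_primepartition := by
  intro n divs _ hpre
  unfold Spec_primepartition
  simp only [primepartition, primepartition_alt]
  rw [genprimes_eq n hpre]
  rw [aloop_eq, List.findSome?_cons]
  cases h : brec (genprimesAlt n) n divs [] <;> simp
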